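-- pv_equiv track=rewrite | github.com/JoSihun/ThisIsCodingTest | Part3_Chapter12/p332_12-13.py | solution
-- ===== SOURCE A (Python) =====
-- from itertools import combinations
--
-- def sum_chicken_distance(houses, candidate):
--     chicken_distance = 0
--     for hrow, hcol in houses:
--         min_distance = int(1e9)
--         for crow, ccol in candidate:
--             min_distance = min(min_distance, abs(hrow - crow) + abs(hcol - ccol))
--         chicken_distance += min_distance
--     return chicken_distance
--
-- def solution(n, m, city):
--     houses = []
--     chickens = []
--     for row in range(n):
--         for col in range(n):
--             if city[row][col] == 1:
--                 houses.append((row, col))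
--             if city[row][col] == 2:
--                 chickens.append((row, col))
--
--     answer = int(1e9)
--     candidates = list(combinations(chickens, m))
--     for candidate in candidates:
--         answer = min(answer, sum_chicken_distance(houses, candidate))
--     return answer
-- ===== SOURCE B (Python) =====
-- def solution(n, m, city):
--     houses = [(r, c) for r in range(n) for c in range(n) if city[r][c] == 1]
--     chickens = [(r, c) for r in range(n) for c in range(n) if city[r][c] == 2]
--     INF = int(1e9)
--
--     # DFS over take/skip decisions on the chicken list, carrying the running
--     # per-house minimum distances; returns None when no m-subset exists.
--     def best(rest, mins, k):
--         if k == 0: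
--             return sum(mins)
--         if not rest:
--             return None
--         (cr, cc) = rest[0]
--         taken = best(rest[1:], [min(mv, abs(hr - cr) + abs(hc - cc))
--                                 for (hr, hc), mv in zip(houses, mins)], k - 1)
--         skipped = best(rest[1:], mins, k)
--         if taken is None:
--             return skipped
--         if skipped is None:
--             return taken
--         return min(taken, skipped)
--
--     r = best(chickens, [INF] * len(houses), m)
--     return INF if r is None else min(INF, r)
-- ===== Notes on version B (the rewrite author's own statement) =====
-- stated objective: alternative
-- what changed: B replaces the materialise-all-m-tuples-and-rescore loop (itertools.combinations + a fresh nested distance scan per tuple) with a take/skip DFS over the chicken list that carries the running per-house minimum distances, so each branch updates one vector instead of recomputing every house-chicken distance per subset.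
import Mathlib
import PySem

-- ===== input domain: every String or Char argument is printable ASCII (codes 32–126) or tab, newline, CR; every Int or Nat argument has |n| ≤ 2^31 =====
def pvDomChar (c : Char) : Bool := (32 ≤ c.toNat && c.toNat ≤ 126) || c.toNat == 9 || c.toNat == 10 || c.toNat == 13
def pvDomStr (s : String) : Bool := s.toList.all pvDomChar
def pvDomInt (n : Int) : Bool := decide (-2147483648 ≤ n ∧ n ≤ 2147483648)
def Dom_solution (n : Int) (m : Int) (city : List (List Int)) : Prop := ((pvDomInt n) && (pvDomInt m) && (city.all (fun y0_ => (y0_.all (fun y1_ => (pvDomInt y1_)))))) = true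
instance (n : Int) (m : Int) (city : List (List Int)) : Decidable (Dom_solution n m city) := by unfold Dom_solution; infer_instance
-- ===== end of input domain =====

-- B replaces the enumerate-all-m-tuples-and-rescore loop with a take/skip DFS
-- carrying running per-house minimum distances (objective: alternative algorithm).

-- ===== PORT A =====
def sumChickenDistance (houses : List (Int × Int)) (cand : List (Int × Int)) : Int :=
  houses.foldl
    (fun acc h =>
      acc + cand.foldl (fun md c => min md (|h.1 - c.1| + |h.2 - c.2|)) 1000000000)
    0

def solution (n : Int) (m : Int) (city : List (List Int)) : Int :=
  let hc : List (Int × Int) × List (Int × Int) :=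
    (PySem.List.pyRange 0 n 1).foldl
      (fun acc row =>
        (PySem.List.pyRange 0 n 1).foldl
          (fun (acc : List (Int × Int) × List (Int × Int)) col =>
            let v := PySem.List.pyGetD (PySem.List.pyGetD city row []) col 0
            let acc1 := if v = 1 then (acc.1 ++ [(row, col)], acc.2) else acc
            if v = 2 then (acc1.1, acc1.2 ++ [(row, col)]) else acc1)
          acc)
      ([], [])
  (PySem.List.combinations hc.2 m.toNat).foldl
    (fun ans cand => min ans (sumChickenDistance hc.1 cand)) 1000000000

-- ===== PORT B =====
def collectB (n : Int) (city : List (List Int)) (v : Int) : List (Int × Int) :=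
  (PySem.List.pyRange 0 n 1).flatMap (fun r =>
    (PySem.List.pyRange 0 n 1).filterMap (fun c =>
      if PySem.List.pyGetD (PySem.List.pyGetD city r []) c 0 = v then some (r, c) else none))

def bestB (houses : List (Int × Int)) : List (Int × Int) → List Int → Int → Option Int
  | [], mins, k =>
    if k = 0 then some (mins.foldl (· + ·) 0) else none
  | ch :: rest, mins, k =>
    if k = 0 then some (mins.foldl (· + ·) 0)
    else
      let taken :=
        bestB houses rest
          (List.zipWith (fun (h : Int × Int) mv => min mv (|h.1 - ch.1| + |h.2 - ch.2|)) houses mins)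
          (k - 1)
      let skipped := bestB houses rest mins k
      match taken, skipped with
      | none, s => s
      | some t, none => some t
      | some t, some s => some (min t s)

def solution_alt (n : Int) (m : Int) (city : List (List Int)) : Int :=
  let houses := collectB n city 1
  let chickens := collectB n city 2
  match bestB houses chickens (houses.map fun _ => (1000000000 : Int)) m with
  | none => 1000000000
  | some r => min 1000000000 r

-- ===== PRECONDITION & SPEC =====
-- Pre_ excludes exactly the inputs where the Python A raises: m < 0 (ValueError from
-- combinations) and grids whose first n rows/columns are missing (IndexError).
def Pre_solution (n : Int) (m : Int) (city : List (List Int)) : Prop :=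
  0 ≤ m ∧ n ≤ (city.length : Int) ∧ ∀ row ∈ city.take n.toNat, n ≤ (row.length : Int)
instance (n : Int) (m : Int) (city : List (List Int)) : Decidable (Pre_solution n m city) := by
  unfold Pre_solution; infer_instance

def pvWitness_solution : Int × Int × List (List Int) := (2, 1, [[1, 2], [0, 2]])

def Spec_solution (n : Int) (m : Int) (city : List (List Int)) (out : Int) : Prop := out = solution_alt n m city
instance (n : Int) (m : Int) (city : List (List Int)) (out : Int) : Decidable (Spec_solution n m city out) := by unfold Spec_solution; infer_instance

-- ===== CLAIM (what is proved, stated in full; the proofs are below) =====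
def Claim_equal_solution : Prop := ∀ (n : Int) (m : Int) (city : List (List Int)), Dom_solution n m city → Pre_solution n m city → Spec_solution n m city (solution n m city)

-- ===== LEMMAS AND PROOFS =====

-- distance and the per-house inner minimum, used to characterise both ports
def pvDist (h c : Int × Int) : Int := |h.1 - c.1| + |h.2 - c.2|

def pvInmin (p : (Int × Int) × Int) (cand : List (Int × Int)) : Int :=
  cand.foldl (fun md c => min md (pvDist p.1 c)) p.2

-- cost of candidate `cand` when house i currently stands at minimum mins[i]
def pvS (houses : List (Int × Int)) (mins : List Int) (cand : List (Int × Int)) : Int :=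
  ((houses.zip mins).map (fun p => pvInmin p cand)).sum

theorem pv_foldl_min_min (t : List Int) : ∀ (a b : Int),
    t.foldl min (min a b) = min a (t.foldl min b) := by
  induction t with
  | nil => intro a b; simp
  | cons x xs ih =>
    intro a b
    simp only [List.foldl_cons, min_assoc]
    exact ih a (min b x)

theorem pv_minfold_min {α : Type} (f : α → Int) (t : List α) : ∀ (a b : Int),
    t.foldl (fun x y => min x (f y)) (min a b) = min a (t.foldl (fun x y => min x (f y)) b) := by
  induction t with
  | nil => intro a b; simp
  | cons x xs ih =>
    intro a b
    simp only [List.foldl_cons, min_assoc]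
    exact ih a (min b (f x))

theorem pv_foldl_min_eq {α : Type} (f : α → Int) (l : List α) (a : Int) :
    l.foldl (fun x y => min x (f y)) a =
      (match (l.map f).min? with | none => a | some v => min a v) := by
  cases l with
  | nil => rfl
  | cons x t =>
    simp only [List.map_cons, List.min?_cons', List.foldl_cons]
    rw [show t.foldl (fun x y => min x (f y)) (min a (f x))
          = min a (t.foldl (fun x y => min x (f y)) (f x)) from pv_minfold_min f t a (f x)]
    rw [List.foldl_map]

theorem pv_min?_append (l1 l2 : List Int) :
    (l1 ++ l2).min? =
      (match l1.min?, l2.min? with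
        | none, s => s
        | some t, none => some t
        | some t, some s => some (min t s)) := by
  cases l1 with
  | nil => cases l2 <;> simp
  | cons a t =>
    cases l2 with
    | nil => simp
    | cons b u =>
      simp only [List.cons_append, List.min?_cons', List.foldl_append, List.foldl_cons]

      rw [pv_foldl_min_min u (t.foldl min a) b]

theorem pv_foldl_sum : ∀ (ms : List Int) (a : Int), ms.foldl (· + ·) a = a + ms.sum := by
  intro ms
  induction ms with
  | nil => intro a; simp
  | cons x t ih => intro a; simp only [List.foldl_cons, List.sum_cons, ih]; ring

theorem pv_sum_snd : ∀ (hs : List (Int × Int)) (ms : List Int), ms.length = hs.length →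
    ((hs.zip ms).map (fun p => p.2)).sum = ms.sum := by
  intro hs
  induction hs with
  | nil => intro ms h; simp [List.length_eq_zero_iff.mp h]
  | cons x t ih =>
    intro ms h
    cases ms with
    | nil => simp at h
    | cons m mt =>
      simp only [List.zip_cons_cons, List.map_cons, List.sum_cons]
      rw [ih mt (by simpa using h)]

theorem pvS_nil (houses : List (Int × Int)) (mins : List Int)
    (h : mins.length = houses.length) : pvS houses mins [] = mins.foldl (· + ·) 0 := by
  unfold pvS pvInmin
  simp only [List.foldl_nil]
  rw [pv_sum_snd houses mins h, pv_foldl_sum mins 0, zero_add]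

theorem pvS_update (ch : Int × Int) (cand : List (Int × Int)) :
    ∀ (houses : List (Int × Int)) (mins : List Int),
    pvS houses (List.zipWith (fun (h : Int × Int) mv => min mv (|h.1 - ch.1| + |h.2 - ch.2|)) houses mins) cand
      = pvS houses mins (ch :: cand) := by
  intro houses
  induction houses with
  | nil => intro mins; simp [pvS]
  | cons h hs ih =>
    intro mins
    cases mins with
    | nil => simp [pvS]
    | cons mv mt =>
      simp only [List.zipWith_cons_cons, List.zip_cons_cons, pvS, List.map_cons, List.sum_cons]
      have h1 : pvInmin (h, min mv (|h.1 - ch.1| + |h.2 - ch.2|)) cand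
          = pvInmin (h, mv) (ch :: cand) := by
        simp [pvInmin, pvDist]
      have h2 := ih mt
      simp only [pvS] at h2
      rw [h1, h2]

theorem pv_bestB_eq (houses : List (Int × Int)) :
    ∀ (xs : List (Int × Int)) (k : Int), 0 ≤ k → ∀ (mins : List Int),
    mins.length = houses.length →
    bestB houses xs mins k = ((PySem.List.combinations xs k.toNat).map (pvS houses mins)).min? := by
  intro xs
  induction xs with
  | nil =>
    intro k hk mins hlen
    by_cases h0 : k = 0
    · simp [bestB, h0, PySem.List.combinations_zero, pvS_nil houses mins hlen]
    · obtain ⟨j, hj⟩ : ∃ j, k.toNat = j + 1 := ⟨k.toNat - 1, by omega⟩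
      simp [bestB, h0, hj, PySem.List.combinations_nil_succ]
  | cons ch rest ih =>
    intro k hk mins hlen
    by_cases h0 : k = 0
    · simp [bestB, h0, PySem.List.combinations_zero, pvS_nil houses mins hlen]
    · have hlen' : (List.zipWith (fun (h : Int × Int) mv => min mv (|h.1 - ch.1| + |h.2 - ch.2|)) houses mins).length = houses.length := by
        simp [List.length_zipWith, hlen]
      rw [show bestB houses (ch :: rest) mins k =
            (match bestB houses rest (List.zipWith (fun (h : Int × Int) mv => min mv (|h.1 - ch.1| + |h.2 - ch.2|)) houses mins) (k - 1),
                   bestB houses rest mins k with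
              | none, s => s
              | some t, none => some t
              | some t, some s => some (min t s)) from by rw [bestB]; simp [h0]]
      rw [ih (k - 1) (by omega) _ hlen', ih k hk mins hlen]
      have hsucc : k.toNat = (k - 1).toNat + 1 := by omega
      rw [hsucc, PySem.List.combinations_cons_succ, List.map_append, pv_min?_append]
      rw [List.map_map]
      rw [show (pvS houses mins ∘ (ch :: ·)) = pvS houses
            (List.zipWith (fun (h : Int × Int) mv => min mv (|h.1 - ch.1| + |h.2 - ch.2|)) houses mins) from
        funext fun c => (pvS_update ch c houses mins).symm]

theorem pv_foldl_addf {α : Type} (g : α → Int) : ∀ (l : List α) (a : Int),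
    l.foldl (fun acc x => acc + g x) a = a + (l.map g).sum := by
  intro l
  induction l with
  | nil => intro a; simp
  | cons x t ih => intro a; simp only [List.foldl_cons, List.map_cons, List.sum_cons, ih]; ring

theorem pv_zip_map_const : ∀ (hs : List (Int × Int)),
    hs.zip (hs.map (fun _ => (1000000000 : Int))) = hs.map (fun h => (h, (1000000000 : Int))) := by
  intro hs
  induction hs with
  | nil => rfl
  | cons x t ih => simp only [List.map_cons, List.zip_cons_cons, ih]

theorem pv_scd_eq (cand : List (Int × Int)) (houses : List (Int × Int)) :
    sumChickenDistance houses cand = pvS houses (houses.map fun _ => (1000000000 : Int)) cand := by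
  unfold sumChickenDistance pvS
  rw [pv_foldl_addf (fun h => cand.foldl (fun md c => min md (|h.1 - c.1| + |h.2 - c.2|)) 1000000000) houses 0,
      zero_add, pv_zip_map_const houses, List.map_map]
  congr 1

-- discovery loop: the pair-accumulator fold equals the two comprehensions
theorem pv_inner_eq (city : List (List Int)) (r : Int) :
    ∀ (cols : List Int) (acc : List (Int × Int) × List (Int × Int)),
    cols.foldl
      (fun (acc : List (Int × Int) × List (Int × Int)) col =>
        let v := PySem.List.pyGetD (PySem.List.pyGetD city r []) col 0
        let acc1 := if v = 1 then (acc.1 ++ [(r, col)], acc.2) else acc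
        if v = 2 then (acc1.1, acc1.2 ++ [(r, col)]) else acc1)
      acc
    = (acc.1 ++ cols.filterMap (fun c =>
          if PySem.List.pyGetD (PySem.List.pyGetD city r []) c 0 = 1 then some (r, c) else none),
       acc.2 ++ cols.filterMap (fun c =>
          if PySem.List.pyGetD (PySem.List.pyGetD city r []) c 0 = 2 then some (r, c) else none)) := by
  intro cols
  induction cols with
  | nil => intro acc; simp
  | cons c cs ih =>
    intro acc
    simp only [List.foldl_cons, List.filterMap_cons]
    by_cases h1 : PySem.List.pyGetD (PySem.List.pyGetD city r []) c 0 = 1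
    · have h2 : ¬ PySem.List.pyGetD (PySem.List.pyGetD city r []) c 0 = 2 := by omega
      simp only [h1, reduceIte]
      rw [ih]
      simp
    · by_cases h2 : PySem.List.pyGetD (PySem.List.pyGetD city r []) c 0 = 2
      · simp only [h2, ite_true]
        rw [ih]
        simp
      · simp only [h1, h2, reduceIte]
        rw [ih]

theorem pv_outer_eq (city : List (List Int)) (n : Int) :
    ∀ (rows : List Int) (acc : List (Int × Int) × List (Int × Int)),
    rows.foldl
      (fun acc row =>
        (PySem.List.pyRange 0 n 1).foldl
          (fun (acc : List (Int × Int) × List (Int × Int)) col =>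
            let v := PySem.List.pyGetD (PySem.List.pyGetD city row []) col 0
            let acc1 := if v = 1 then (acc.1 ++ [(row, col)], acc.2) else acc
            if v = 2 then (acc1.1, acc1.2 ++ [(row, col)]) else acc1)
          acc)
      acc
    = (acc.1 ++ rows.flatMap (fun r => (PySem.List.pyRange 0 n 1).filterMap (fun c =>
          if PySem.List.pyGetD (PySem.List.pyGetD city r []) c 0 = 1 then some (r, c) else none)),
       acc.2 ++ rows.flatMap (fun r => (PySem.List.pyRange 0 n 1).filterMap (fun c =>
          if PySem.List.pyGetD (PySem.List.pyGetD city r []) c 0 = 2 then some (r, c) else none))) := by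
  intro rows
  induction rows with
  | nil => intro acc; simp
  | cons r rs ih =>
    intro acc
    simp only [List.foldl_cons, List.flatMap_cons]
    rw [pv_inner_eq city r (PySem.List.pyRange 0 n 1) acc, ih]
    simp

-- ===== VERDICT (by name: the statement is the Claim_ definition above) =====
theorem solution_spec : Claim_equal_solution := by
  unfold Claim_equal_solution
  intro n m city _ hpre
  unfold Spec_solution solution solution_alt
  rw [pv_outer_eq city n (PySem.List.pyRange 0 n 1) ([], [])]
  simp only [List.nil_append]
  rw [show collectB n city 1 = (PySem.List.pyRange 0 n 1).flatMap (fun r => (PySem.List.pyRange 0 n 1).filterMap (fun c =>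
        if PySem.List.pyGetD (PySem.List.pyGetD city r []) c 0 = 1 then some (r, c) else none)) from rfl]
  rw [show collectB n city 2 = (PySem.List.pyRange 0 n 1).flatMap (fun r => (PySem.List.pyRange 0 n 1).filterMap (fun c =>
        if PySem.List.pyGetD (PySem.List.pyGetD city r []) c 0 = 2 then some (r, c) else none)) from rfl]
  set houses := (PySem.List.pyRange 0 n 1).flatMap (fun r => (PySem.List.pyRange 0 n 1).filterMap (fun c =>
        if PySem.List.pyGetD (PySem.List.pyGetD city r []) c 0 = 1 then some (r, c) else none)) with hH
  set chickens := (PySem.List.pyRange 0 n 1).flatMap (fun r => (PySem.List.pyRange 0 n 1).filterMap (fun c =>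
        if PySem.List.pyGetD (PySem.List.pyGetD city r []) c 0 = 2 then some (r, c) else none)) with hC
  rw [pv_foldl_min_eq (sumChickenDistance houses) (PySem.List.combinations chickens m.toNat) 1000000000]
  rw [show (PySem.List.combinations chickens m.toNat).map (sumChickenDistance houses)
        = (PySem.List.combinations chickens m.toNat).map (pvS houses (houses.map fun _ => (1000000000 : Int))) from
      List.map_congr_left (fun c _ => pv_scd_eq c houses)]
  rw [← pv_bestB_eq houses chickens m hpre.1 (houses.map fun _ => (1000000000 : Int)) (by simp)]
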